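-- pv_equiv track=rewrite | github.com/JoJoTsui/rnadnavar | bin/run_consensus_vcf.py | categorize_filter
-- ===== SOURCE A (Python) =====
-- FILTER_CATEGORIES = {
--     'quality': ['LowQuality', 'LowEvidenceScore', 'LowTumorLOD', 'WeakEvidence'],
--     'depth': ['LowDepth', 'LowAlleleFrequency'],
--     'bias': ['StrandBias', 'OrientationBias', 'StrictStrandBias'],
--     'germline': ['Germline', 'GermlineRisk'],
--     'artifact': ['NormalArtifact', 'PanelOfNormals', 'Contamination'],
--     'technical': ['LowMappingQuality', 'LowBaseQuality', 'Duplicate', 'FragmentEvidence'],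
--     'reference': ['ReferenceCall'],
-- }
--
-- def categorize_filter(normalized_filter):
--     """
--     Categorize normalized filter into major categories
--     Returns: primary category or 'Other'
--     """
--     if normalized_filter == 'PASS':
--         return 'PASS'
--
--     filters = normalized_filter.split(';')
--     categories = set()
--
--     for filt in filters:
--         for cat, members in FILTER_CATEGORIES.items():
--             if filt in members:
--                 categories.add(cat)
--                 break
--
--     if not categories:
--         return 'Other'
--     elif len(categories) == 1:
--         return list(categories)[0]
--     else:
--         # Multiple categories - return concatenated
--         return ';'.join(sorted(categories))
-- ===== SOURCE B (Python) =====
-- # B: category-major scan over an alphabetically pre-sorted table, testing each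
-- # category's member set against the token set, so no per-token inner scan, no
-- # category set and no final sort are needed (objective: alternative/idiomatic).
-- _SORTED_CATEGORIES = [
--     ('artifact', {'NormalArtifact', 'PanelOfNormals', 'Contamination'}),
--     ('bias', {'StrandBias', 'OrientationBias', 'StrictStrandBias'}),
--     ('depth', {'LowDepth', 'LowAlleleFrequency'}),
--     ('germline', {'Germline', 'GermlineRisk'}),
--     ('quality', {'LowQuality', 'LowEvidenceScore', 'LowTumorLOD', 'WeakEvidence'}),
--     ('reference', {'ReferenceCall'}),
--     ('technical', {'LowMappingQuality', 'LowBaseQuality', 'Duplicate', 'FragmentEvidence'}),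
-- ]
--
-- def categorize_filter(normalized_filter):
--     if normalized_filter == 'PASS':
--         return 'PASS'
--     tokens = set(normalized_filter.split(';'))
--     cats = [cat for cat, members in _SORTED_CATEGORIES if not tokens.isdisjoint(members)]
--     if not cats:
--         return 'Other'
--     if len(cats) == 1:
--         return cats[0]
--     return ';'.join(cats)
-- ===== Notes on version B (the rewrite author's own statement) =====
-- stated objective: alternative
-- what changed: Replaces the token-major double loop (scan every category's member list per token, collect a set, then sort it) by a category-major pass over an alphabetically pre-sorted category table, keeping each category whose member set intersects the token set, so the output list is built already sorted and no set-of-categories or final sort exists.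
import Mathlib
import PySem

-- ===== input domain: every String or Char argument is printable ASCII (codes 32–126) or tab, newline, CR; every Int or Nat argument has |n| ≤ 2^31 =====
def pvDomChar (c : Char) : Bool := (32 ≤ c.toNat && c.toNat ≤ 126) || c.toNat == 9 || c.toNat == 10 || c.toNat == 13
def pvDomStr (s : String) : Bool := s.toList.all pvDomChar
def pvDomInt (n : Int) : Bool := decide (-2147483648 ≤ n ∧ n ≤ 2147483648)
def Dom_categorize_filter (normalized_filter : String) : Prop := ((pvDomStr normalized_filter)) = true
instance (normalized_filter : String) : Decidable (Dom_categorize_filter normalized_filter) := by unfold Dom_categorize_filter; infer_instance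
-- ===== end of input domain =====

-- B replaces A's token-major double loop + category set + final sort by one pass over an
-- alphabetically pre-sorted category table intersected with the token set (alternative; not faster).

-- ===== PORT A =====
def filterCategories : List (String × List String) :=
  [("quality", ["LowQuality", "LowEvidenceScore", "LowTumorLOD", "WeakEvidence"]),
   ("depth", ["LowDepth", "LowAlleleFrequency"]),
   ("bias", ["StrandBias", "OrientationBias", "StrictStrandBias"]),
   ("germline", ["Germline", "GermlineRisk"]),
   ("artifact", ["NormalArtifact", "PanelOfNormals", "Contamination"]),
   ("technical", ["LowMappingQuality", "LowBaseQuality", "Duplicate", "FragmentEvidence"]),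
   ("reference", ["ReferenceCall"])]

-- A's inner 'for cat, members in FILTER_CATEGORIES.items(): if filt in members: … break'
def catOf (filt : String) : List (String × List String) → Option String
  | [] => none
  | (cat, members) :: rest => if filt ∈ members then some cat else catOf filt rest

-- A's outer loop building the set 'categories'
def aCategories (filters : List String) : PySem.Set String :=
  filters.foldl (fun s filt =>
    match catOf filt filterCategories with
    | some cat => PySem.Set.add s cat
    | none => s) PySem.Set.empty

def categorize_filter (normalized_filter : String) : String :=
  if normalized_filter == "PASS" then "PASS"
  else
    let filters := (PySem.Chars.splitOn normalized_filter.toList [';']).map String.ofList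
    let categories := aCategories filters
    if categories.length = 0 then "Other"
    else if categories.length = 1 then categories.headD ""   -- list(categories)[0]; the list is nonempty here
    else PySem.Str.join ";" (PySem.List.sorted categories (fun x => x))

-- ===== PORT B =====
def sortedCategories : List (String × List String) :=
  [("artifact", ["NormalArtifact", "PanelOfNormals", "Contamination"]),
   ("bias", ["StrandBias", "OrientationBias", "StrictStrandBias"]),
   ("depth", ["LowDepth", "LowAlleleFrequency"]),
   ("germline", ["Germline", "GermlineRisk"]),
   ("quality", ["LowQuality", "LowEvidenceScore", "LowTumorLOD", "WeakEvidence"]),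
   ("reference", ["ReferenceCall"]),
   ("technical", ["LowMappingQuality", "LowBaseQuality", "Duplicate", "FragmentEvidence"])]

-- B's list comprehension over the pre-sorted table
def bCats (tokens : PySem.Set String) : List String :=
  (sortedCategories.filter (fun cm => !(PySem.Set.isdisjoint tokens cm.2))).map Prod.fst

def categorize_filter_alt (normalized_filter : String) : String :=
  if normalized_filter == "PASS" then "PASS"
  else
    let tokens : PySem.Set String := PySem.Set.ofList ((PySem.Chars.splitOn normalized_filter.toList [';']).map String.ofList)
    let cats := bCats tokens
    if cats.length = 0 then "Other"
    else if cats.length = 1 then cats.headD ""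
    else PySem.Str.join ";" cats

-- ===== PRECONDITION & SPEC =====
def Spec_categorize_filter (normalized_filter : String) (out : String) : Prop := out = categorize_filter_alt normalized_filter
instance (normalized_filter : String) (out : String) : Decidable (Spec_categorize_filter normalized_filter out) := by unfold Spec_categorize_filter; infer_instance

-- ===== CLAIM (what is proved, stated in full; the proofs are below) =====
def Claim_equal_categorize_filter : Prop := ∀ (normalized_filter : String), Dom_categorize_filter normalized_filter → Spec_categorize_filter normalized_filter (categorize_filter normalized_filter)

-- ===== LEMMAS AND PROOFS =====

lemma aCategories_nodup_aux (filters : List String) (s : PySem.Set String) (hs : s.Nodup) :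
    (filters.foldl (fun s filt =>
      match catOf filt filterCategories with
      | some cat => PySem.Set.add s cat
      | none => s) s).Nodup := by
  induction filters generalizing s with
  | nil => exact hs
  | cons t ts ih =>
    simp only [List.foldl_cons]
    cases catOf t filterCategories with
    | none => exact ih s hs
    | some c => exact ih _ (PySem.Set.nodup_add s c hs)

lemma aCategories_nodup (filters : List String) : (aCategories filters).Nodup :=
  aCategories_nodup_aux filters PySem.Set.empty List.nodup_nil

lemma mem_aCategories_aux (filters : List String) (s : PySem.Set String) (c : String) :
    c ∈ (filters.foldl (fun s filt =>
      match catOf filt filterCategories with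
      | some cat => PySem.Set.add s cat
      | none => s) s) ↔ c ∈ s ∨ ∃ t ∈ filters, catOf t filterCategories = some c := by
  induction filters generalizing s with
  | nil => simp
  | cons t ts ih =>
    simp only [List.foldl_cons, List.mem_cons]
    cases h : catOf t filterCategories with
    | none =>
      rw [ih]
      constructor
      · rintro (h1 | ⟨u, hu, hc⟩)
        · exact Or.inl h1
        · exact Or.inr ⟨u, Or.inr hu, hc⟩
      · rintro (h1 | ⟨u, (rfl | hu), hc⟩)
        · exact Or.inl h1
        · rw [h] at hc; cases hc
        · exact Or.inr ⟨u, hu, hc⟩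
    | some d =>
      rw [ih]
      simp only [PySem.Set.mem_add]
      constructor
      · rintro ((h1 | rfl) | ⟨u, hu, hc⟩)
        · exact Or.inl h1
        · exact Or.inr ⟨t, Or.inl rfl, h⟩
        · exact Or.inr ⟨u, Or.inr hu, hc⟩
      · rintro (h1 | ⟨u, (rfl | hu), hc⟩)
        · exact Or.inl (Or.inl h1)
        · rw [h] at hc; cases hc; exact Or.inl (Or.inr rfl)
        · exact Or.inr ⟨u, hu, hc⟩

lemma mem_aCategories (filters : List String) (c : String) :
    c ∈ aCategories filters ↔ ∃ t ∈ filters, catOf t filterCategories = some c := by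
  rw [aCategories, mem_aCategories_aux]; simp [PySem.Set.empty]

-- every member of every category is mapped to that category by A's inner loop
lemma catOf_back : ∀ cm ∈ sortedCategories, ∀ t ∈ cm.2, catOf t filterCategories = some cm.1 := by
  decide

lemma catOf_fwd (t c : String) (h : catOf t filterCategories = some c) :
    ∃ cm ∈ sortedCategories, c = cm.1 ∧ t ∈ cm.2 := by
  simp only [filterCategories, catOf] at h
  split_ifs at h with h1 h2 h3 h4 h5 h6 h7 <;> cases h
  · exact ⟨("quality", ["LowQuality", "LowEvidenceScore", "LowTumorLOD", "WeakEvidence"]), by decide, rfl, h1⟩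
  · exact ⟨("depth", ["LowDepth", "LowAlleleFrequency"]), by decide, rfl, h2⟩
  · exact ⟨("bias", ["StrandBias", "OrientationBias", "StrictStrandBias"]), by decide, rfl, h3⟩
  · exact ⟨("germline", ["Germline", "GermlineRisk"]), by decide, rfl, h4⟩
  · exact ⟨("artifact", ["NormalArtifact", "PanelOfNormals", "Contamination"]), by decide, rfl, h5⟩
  · exact ⟨("technical", ["LowMappingQuality", "LowBaseQuality", "Duplicate", "FragmentEvidence"]), by decide, rfl, h6⟩
  · exact ⟨("reference", ["ReferenceCall"]), by decide, rfl, h7⟩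

lemma mem_bCats (tokens : PySem.Set String) (c : String) :
    c ∈ bCats tokens ↔ ∃ cm ∈ sortedCategories, c = cm.1 ∧ ∃ t ∈ tokens, t ∈ cm.2 := by
  simp only [bCats, List.mem_map, List.mem_filter, Bool.not_eq_true']
  constructor
  · rintro ⟨cm, ⟨hmem, hdis⟩, rfl⟩
    refine ⟨cm, hmem, rfl, ?_⟩
    by_contra hno
    have hd : PySem.Set.isdisjoint tokens cm.2 = true :=
      (PySem.Set.isdisjoint_iff _ _).mpr (fun x hx hxm => hno ⟨x, hx, hxm⟩)
    simp [hd] at hdis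
  · rintro ⟨cm, hmem, rfl, t, ht, htm⟩
    refine ⟨cm, ⟨hmem, ?_⟩, rfl⟩
    by_contra hd
    simp only [Bool.not_eq_false] at hd
    exact ((PySem.Set.isdisjoint_iff _ _).mp hd) t ht htm

lemma bCats_pairwise (tokens : PySem.Set String) :
    (bCats tokens).Pairwise (fun a b => a < b) := by
  have hsub : (bCats tokens).Sublist (sortedCategories.map Prod.fst) :=
    List.Sublist.map Prod.fst List.filter_sublist
  have h : (sortedCategories.map Prod.fst).Pairwise (fun a b : String => a.toList < b.toList) := by
    decide
  exact (h.imp fun hab => String.lt_iff_toList_lt.mpr hab).sublist hsub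

lemma bCats_nodup (tokens : PySem.Set String) : (bCats tokens).Nodup :=
  (bCats_pairwise tokens).imp (fun h => ne_of_lt h)

-- same membership, hence a permutation
lemma aCategories_perm_bCats (ts : List String) :
    (bCats (PySem.Set.ofList ts)).Perm (aCategories ts) := by
  rw [List.perm_ext_iff_of_nodup (bCats_nodup _) (aCategories_nodup ts)]
  intro c
  rw [mem_bCats, mem_aCategories]
  constructor
  · rintro ⟨cm, hmem, rfl, t, ht, htm⟩
    exact ⟨t, (PySem.Set.mem_ofList _ _).mp ht, catOf_back cm hmem t htm⟩
  · rintro ⟨t, ht, hc⟩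
    obtain ⟨cm, hmem, rfl, htm⟩ := catOf_fwd t c hc
    exact ⟨cm, hmem, rfl, t, (PySem.Set.mem_ofList _ _).mpr ht, htm⟩

lemma sorted_aCategories (ts : List String) :
    PySem.List.sorted (aCategories ts) (fun x => x) = bCats (PySem.Set.ofList ts) :=
  PySem.List.sorted_eq_of_perm_of_pairwise_lt _ _ _ (aCategories_perm_bCats ts) (bCats_pairwise _)

-- ===== VERDICT (by name: the statement is the Claim_ definition above) =====
theorem categorize_filter_spec : Claim_equal_categorize_filter := by
  intro nf _
  unfold Spec_categorize_filter categorize_filter categorize_filter_alt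
  by_cases hp : nf == "PASS"
  · simp [hp]
  · simp only [hp, Bool.false_eq_true, if_false]
    set ts := (PySem.Chars.splitOn nf.toList [';']).map String.ofList with hts
    have hperm := aCategories_perm_bCats ts
    have hlen : (bCats (PySem.Set.ofList ts)).length = (aCategories ts).length := hperm.length_eq
    by_cases h0 : (aCategories ts).length = 0
    · simp [h0, hlen.trans h0]
    · by_cases h1 : (aCategories ts).length = 1
      · obtain ⟨a, ha⟩ := List.length_eq_one_iff.mp h1
        have hB : bCats (PySem.Set.ofList ts) = [a] := by
          have hp2 := hperm; rw [ha] at hp2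
          exact List.perm_singleton.mp hp2
        simp [ha, hB]
      · have hB0 : ¬ (bCats (PySem.Set.ofList ts)).length = 0 := by omega
        have hB1 : ¬ (bCats (PySem.Set.ofList ts)).length = 1 := by omega
        simp only [h0, h1, hB0, hB1, if_false]
        rw [sorted_aCategories]
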